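-- pv_equiv track=rewrite | github.com/Pooky112/Baekjoon | 백준/Gold/17141. 연구소 2/연구소 2.py | solution
-- ===== SOURCE A (Python) =====
-- from collections import deque
-- from itertools import combinations
--
-- def solution(graph, N, M):
--     answer = float('inf')
--     directions = [(-1, 0), (0, 1), (1, 0), (0, -1)]
--
--     loc_2 = []
--     for i in range(N):
--         for j in range(N):
--             if graph[i][j] == 2:
--                 loc_2.append((i, j))
--     number_of_1 = 0
--     for i in range(N):
--         number_of_1 += graph[i].count(1)
--
--
--     combi = list(combinations(loc_2, M))
--
--     queue = deque()
--
--     for comb in combi: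
--         visited = [[-1] * N for _ in range(N)]
--         for com in comb:
--             queue.append(com)
--         for i in range(M):
--
--             visited[comb[i][0]][comb[i][1]] = 0
--         while queue:
--             x, y = queue.popleft()
--             for dx, dy in directions:
--                 nx, ny = x + dx, y + dy
--                 if 0 <= nx < N and 0 <= ny < N and not graph[nx][ny] == 1:
--                     if visited[nx][ny] == -1 or visited[nx][ny] > visited[x][y] + 1:
--                         visited[nx][ny] = visited[x][y] + 1
--                         queue.append((nx, ny))
--
--         count = 0
--         for i in range(N):
--             count += visited[i].count(-1)
--         if count != number_of_1:
--             continue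
--
--         max_val = 0
--         for i in range(N):
--             for j in range(N):
--                 max_val = max(max_val, visited[i][j])
--
--         answer = min(answer, max_val)
--
--     return -1 if answer == float('inf') else answer
-- ===== SOURCE B (Python) =====
-- from itertools import combinations
--
--
-- def solution(graph, N, M):
--     # Level-synchronous multi-source BFS per source subset, with a live
--     # `remaining` counter instead of distance labels + final grid scans.
--     sources = [(i, j) for i in range(N) for j in range(N) if graph[i][j] == 2]
--     empties = sum(1 for i in range(N) for j in range(N) if graph[i][j] != 1)
--     best = -1
--     for comb in combinations(sources, M):
--         visited = [[False] * N for _ in range(N)]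
--         for (i, j) in comb:
--             visited[i][j] = True
--         frontier = list(comb)
--         remaining = empties - M
--         time = 0
--         last = 0
--         while frontier:
--             nxt = []
--             for (x, y) in frontier:
--                 for nx, ny in ((x - 1, y), (x, y + 1), (x + 1, y), (x, y - 1)):
--                     if 0 <= nx < N and 0 <= ny < N and graph[nx][ny] != 1 and not visited[nx][ny]:
--                         visited[nx][ny] = True
--                         remaining -= 1
--                         nxt.append((nx, ny))
--             time += 1
--             if nxt:
--                 last = time
--             frontier = nxt
--         if remaining == 0 and (best == -1 or last < best):
--             best = last
--     return best
-- ===== Notes on version B (the rewrite author's own statement) =====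
-- stated objective: alternative
-- what changed: Per source-subset, A runs a deque-driven distance-relaxation (labels each cell with a distance, then re-scans the whole grid to count unreached cells and take the max label); B runs a level-synchronous frontier BFS with a boolean visited grid, a live `remaining` counter and a round clock, so no distance grid, no relaxation test and no final counting/max scans exist.
-- outside the precondition, e.g. on solution([[2, 1]], 1, 1): A returns -1, B returns 0
import Mathlib
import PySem

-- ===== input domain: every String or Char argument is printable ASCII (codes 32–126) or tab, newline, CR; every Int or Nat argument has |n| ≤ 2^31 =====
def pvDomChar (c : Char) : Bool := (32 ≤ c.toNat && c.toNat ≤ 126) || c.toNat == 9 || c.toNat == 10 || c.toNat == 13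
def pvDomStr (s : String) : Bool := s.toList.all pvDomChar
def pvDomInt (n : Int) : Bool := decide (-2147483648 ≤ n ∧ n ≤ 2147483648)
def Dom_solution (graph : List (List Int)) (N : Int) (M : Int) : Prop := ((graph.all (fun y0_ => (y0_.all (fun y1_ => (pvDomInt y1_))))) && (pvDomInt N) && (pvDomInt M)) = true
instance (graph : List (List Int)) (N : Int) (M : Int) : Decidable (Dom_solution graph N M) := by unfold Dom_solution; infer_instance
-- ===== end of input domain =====

-- B replaces A's distance-labelled deque relaxation by a level-synchronous
-- multi-source BFS with a live `remaining` counter and round clock, removing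
-- the final full-grid count and max scans (objective: alternative).

-- shared 2D-grid access helpers (Python `v[i][j]` read / `v[i][j] = a` write)
def gget (graph : List (List Int)) (i j : Int) : Int :=
  PySem.List.pyGetD (PySem.List.pyGetD graph i []) j 0

def cellGet {α : Type} (v : List (List α)) (c : Int × Int) (d : α) : α :=
  PySem.List.pyGetD (PySem.List.pyGetD v c.1 []) c.2 d

def cellSet {α : Type} (v : List (List α)) (c : Int × Int) (a : α) : List (List α) :=
  v.set c.1.toNat ((PySem.List.pyGetD v c.1 []).set c.2.toNat a)

-- ===== PORT A =====
def dirs : List (Int × Int) := [(-1, 0), (0, 1), (1, 0), (0, -1)]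

def astep (graph : List (List Int)) (N : Int) (c : Int × Int)
    (st : List (Int × Int) × List (List Int)) (d : Int × Int) :
    List (Int × Int) × List (List Int) :=
  let n : Int × Int := (c.1 + d.1, c.2 + d.2)
  if 0 ≤ n.1 ∧ n.1 < N ∧ 0 ≤ n.2 ∧ n.2 < N ∧ ¬ gget graph n.1 n.2 = 1 then
    if cellGet st.2 n (-1) = -1 ∨ cellGet st.2 n (-1) > cellGet st.2 c (-1) + 1 then
      (st.1 ++ [n], cellSet st.2 n (cellGet st.2 c (-1) + 1))
    else st
  else st

-- A's `while queue:` loop; the fuel is a bound on the number of pops, ample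
-- for every admitted input (proved below), so the loop always drains.
def aloop (graph : List (List Int)) (N : Int) :
    Nat → List (Int × Int) → List (List Int) → List (List Int)
  | 0, _, v => v
  | _ + 1, [], v => v
  | f + 1, c :: q, v =>
    let st := dirs.foldl (astep graph N c) (q, v)
    aloop graph N f st.1 st.2

def acomb (graph : List (List Int)) (N : Int) (number1 : Int)
    (ans : Option Int) (comb : List (Int × Int)) : Option Int :=
  let Nn := N.toNat
  let v0 : List (List Int) := List.replicate Nn (List.replicate Nn (-1))
  let v1 := comb.foldl (fun v c => cellSet v c 0) v0
  let v2 := aloop graph N (Nn * Nn + comb.length + 1) comb v1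
  let count := (PySem.List.pyRange 0 N 1).foldl
      (fun s i => s + PySem.List.count (PySem.List.pyGetD v2 i []) (-1)) 0
  if count ≠ number1 then ans
  else
    let mx := (PySem.List.pyRange 0 N 1).foldl
      (fun m i => (PySem.List.pyRange 0 N 1).foldl
        (fun m j => max m (cellGet v2 (i, j) (-1))) m) 0
    some (match ans with | none => mx | some a => min a mx)

def solution (graph : List (List Int)) (N : Int) (M : Int) : Int :=
  let loc2 := (PySem.List.pyRange 0 N 1).foldl (fun acc i =>
      (PySem.List.pyRange 0 N 1).foldl (fun acc j =>
        if gget graph i j = 2 then acc ++ [(i, j)] else acc) acc) []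
  let number1 := (PySem.List.pyRange 0 N 1).foldl
      (fun s i => s + PySem.List.count (PySem.List.pyGetD graph i []) 1) 0
  let combi := PySem.List.combinations loc2 M.toNat
  match combi.foldl (acomb graph N number1) none with
  | none => -1
  | some a => a

-- ===== PORT B =====
def neighbors (c : Int × Int) : List (Int × Int) :=
  [(c.1 - 1, c.2), (c.1, c.2 + 1), (c.1 + 1, c.2), (c.1, c.2 - 1)]

def bstep (graph : List (List Int)) (N : Int)
    (st : List (Int × Int) × List (List Bool) × Int) (n : Int × Int) :
    List (Int × Int) × List (List Bool) × Int :=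
  if 0 ≤ n.1 ∧ n.1 < N ∧ 0 ≤ n.2 ∧ n.2 < N ∧ gget graph n.1 n.2 ≠ 1 ∧
      cellGet st.2.1 n false = false then
    (st.1 ++ [n], cellSet st.2.1 n true, st.2.2 - 1)
  else st

def bcell (graph : List (List Int)) (N : Int)
    (st : List (Int × Int) × List (List Bool) × Int) (c : Int × Int) :
    List (Int × Int) × List (List Bool) × Int :=
  (neighbors c).foldl (bstep graph N) st

-- B's `while frontier:` loop; fuel bounds the number of rounds (ample, proved below).
def bloop (graph : List (List Int)) (N : Int) :
    Nat → List (Int × Int) → List (List Bool) → Int → Int → Int → Int × Int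
  | 0, _, _, _, last, rem => (last, rem)
  | f + 1, F, vb, t, last, rem =>
    if F.isEmpty then (last, rem)
    else
      let st := F.foldl (bcell graph N) ([], vb, rem)
      bloop graph N f st.1 st.2.1 (t + 1) (if st.1.isEmpty then last else t + 1) st.2.2

def bcomb (graph : List (List Int)) (N : Int) (empties : Int)
    (best : Int) (comb : List (Int × Int)) : Int :=
  let Nn := N.toNat
  let vb0 : List (List Bool) := List.replicate Nn (List.replicate Nn false)
  let vb1 := comb.foldl (fun v c => cellSet v c true) vb0
  let res := bloop graph N (Nn * Nn + 2) comb vb1 0 0 (empties - comb.length)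
  if res.2 = 0 ∧ (best = -1 ∨ res.1 < best) then res.1 else best

def solution_alt (graph : List (List Int)) (N : Int) (M : Int) : Int :=
  let sources := (PySem.List.pyRange 0 N 1).foldl (fun acc i =>
      (PySem.List.pyRange 0 N 1).foldl (fun acc j =>
        if gget graph i j = 2 then acc ++ [(i, j)] else acc) acc) []
  let empties := (PySem.List.pyRange 0 N 1).foldl (fun s i =>
      (PySem.List.pyRange 0 N 1).foldl (fun s j =>
        if gget graph i j ≠ 1 then s + 1 else s) s) 0
  (PySem.List.combinations sources M.toNat).foldl (bcomb graph N empties) (-1)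

-- ===== PRECONDITION & SPEC =====
-- Pre_ excludes M < 0, where A raises ValueError in combinations, and (for
-- N > 0) grids whose first N rows are not exactly N wide: a short row can make
-- A raise IndexError, and on longer rows A returns but its coverage test counts
-- walls lying outside the N×N board — an unspecified corner outside the
-- problem's N×N contract where either behaviour is defensible.
def Pre_solution (graph : List (List Int)) (N : Int) (M : Int) : Prop :=
  0 ≤ M ∧ (N ≤ 0 ∨ (N ≤ (graph.length : Int) ∧
    ∀ r ∈ graph.take N.toNat, (r.length : Int) = N))
instance (graph : List (List Int)) (N : Int) (M : Int) : Decidable (Pre_solution graph N M) := by unfold Pre_solution; infer_instance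

def pvWitness_solution : List (List Int) × Int × Int := ([[2, 0], [0, 1]], 2, 1)

def Spec_solution (graph : List (List Int)) (N : Int) (M : Int) (out : Int) : Prop := out = solution_alt graph N M
instance (graph : List (List Int)) (N : Int) (M : Int) (out : Int) : Decidable (Spec_solution graph N M out) := by unfold Spec_solution; infer_instance

-- ===== CLAIM (what is proved, stated in full; the proofs are below) =====
def Claim_equal_solution : Prop := ∀ (graph : List (List Int)) (N : Int) (M : Int), Dom_solution graph N M → Pre_solution graph N M → Spec_solution graph N M (solution graph N M)

-- ===== LEMMAS AND PROOFS =====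

-- ---------- basic grid infrastructure ----------
def inR (N : Int) (c : Int × Int) : Prop :=
  0 ≤ c.1 ∧ c.1 < N ∧ 0 ≤ c.2 ∧ c.2 < N

def Shape {α : Type} (v : List (List α)) (n : Nat) : Prop :=
  v.length = n ∧ ∀ r ∈ v, r.length = n

theorem cellGet_nonneg {α : Type} (v : List (List α)) (c : Int × Int) (d : α)
    (h1 : 0 ≤ c.1) (h2 : 0 ≤ c.2) :
    cellGet v c d = (v.getD c.1.toNat []).getD c.2.toNat d := by
  simp [cellGet, PySem.List.pyGetD_of_nonneg _ _ h1, PySem.List.pyGetD_of_nonneg _ _ h2]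

theorem shape_row {α : Type} {v : List (List α)} {n : Nat} (hs : Shape v n)
    {i : Nat} (hi : i < n) : (v.getD i []).length = n := by
  obtain ⟨hl, hr⟩ := hs
  have : i < v.length := by omega
  rw [List.getD_eq_getElem _ _ this]
  exact hr _ (List.getElem_mem this)

theorem getD_set_eq' {α : Type} (l : List α) (i : Nat) (x : α) (d : α) (h : i < l.length) :
    (l.set i x).getD i d = x := by
  rw [List.getD_eq_getElem?_getD, List.getElem?_set_self h]; rfl

theorem getD_set_ne' {α : Type} (l : List α) {i j : Nat} (x : α) (d : α) (h : i ≠ j) :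
    (l.set i x).getD j d = l.getD j d := by
  rw [List.getD_eq_getElem?_getD, List.getElem?_set_ne h, ← List.getD_eq_getElem?_getD]

theorem shape_cellSet {α : Type} {v : List (List α)} {n : Nat} {N : Int}
    (hs : Shape v n) (hn : n = N.toNat) {c : Int × Int} (hc : inR N c) (a : α) :
    Shape (cellSet v c a) n := by
  obtain ⟨h1, h2, h3, h4⟩ := hc
  refine ⟨by simp [cellSet, hs.1], ?_⟩
  intro r hmem
  rcases List.mem_or_eq_of_mem_set hmem with h | h
  · exact hs.2 _ h
  · subst h
    rw [List.length_set, PySem.List.pyGetD_of_nonneg _ _ h1]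
    exact shape_row hs (show c.1.toNat < n by omega)

theorem cellGet_cellSet_self {α : Type} {v : List (List α)} {n : Nat} {N : Int}
    (hs : Shape v n) (hn : n = N.toNat) {c : Int × Int} (hc : inR N c) (a : α) (d : α) :
    cellGet (cellSet v c a) c d = a := by
  obtain ⟨h1, h2, h3, h4⟩ := hc
  have hi : c.1.toNat < v.length := by rw [hs.1]; omega
  have hrow : (v.getD c.1.toNat []).length = n := shape_row hs (by omega)
  rw [cellGet_nonneg _ _ _ h1 h3]
  unfold cellSet
  rw [PySem.List.pyGetD_of_nonneg _ _ h1, getD_set_eq' _ _ _ _ hi,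
    getD_set_eq' _ _ _ _ (by rw [hrow]; omega)]

theorem cellGet_cellSet_ne {α : Type} {v : List (List α)} {n : Nat} {N : Int}
    (hs : Shape v n) (hn : n = N.toNat) {c c' : Int × Int}
    (hc : inR N c) (hc' : inR N c') (hne : c' ≠ c) (a : α) (d : α) :
    cellGet (cellSet v c a) c' d = cellGet v c' d := by
  obtain ⟨h1, h2, h3, h4⟩ := hc
  obtain ⟨g1, g2, g3, g4⟩ := hc'
  have hi : c.1.toNat < v.length := by rw [hs.1]; omega
  rw [cellGet_nonneg _ _ _ g1 g3, cellGet_nonneg _ _ _ g1 g3]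
  unfold cellSet
  rw [PySem.List.pyGetD_of_nonneg _ _ h1]
  by_cases hrow : c'.1.toNat = c.1.toNat
  · have hcol : c.2.toNat ≠ c'.2.toNat := by
      intro h; apply hne; apply Prod.ext <;> omega
    rw [hrow, getD_set_eq' _ _ _ _ hi, getD_set_ne' _ _ _ hcol]
  · rw [getD_set_ne' _ _ _ (fun h => hrow h.symm)]

theorem shape_replicate {α : Type} (n : Nat) (x : α) :
    Shape (List.replicate n (List.replicate n x)) n := by
  constructor
  · simp
  · intro r hr
    rw [List.eq_of_mem_replicate hr]; simp

theorem cellGet_replicate {α : Type} {n : Nat} {N : Int} (hn : n = N.toNat)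
    {c : Int × Int} (hc : inR N c) (x d : α) :
    cellGet (List.replicate n (List.replicate n x)) c d = x := by
  obtain ⟨h1, h2, h3, h4⟩ := hc
  rw [cellGet_nonneg _ _ _ h1 h3]
  have e1 : (List.replicate n (List.replicate n x))[c.1.toNat]?.getD [] = List.replicate n x := by
    rw [List.getElem?_replicate, if_pos (show c.1.toNat < n by omega)]; rfl
  have e2 : (List.replicate n x)[c.2.toNat]?.getD d = x := by
    rw [List.getElem?_replicate, if_pos (show c.2.toNat < n by omega)]; rfl
  rw [List.getD_eq_getElem?_getD, List.getD_eq_getElem?_getD, e1, e2]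

-- ---------- cells of the board and counting ----------
def cells (N : Int) : List (Int × Int) :=
  (PySem.List.pyRange 0 N) ×ˢ (PySem.List.pyRange 0 N)

theorem mem_cells {N : Int} {c : Int × Int} : c ∈ cells N ↔ inR N c := by
  obtain ⟨i, j⟩ := c
  simp [cells, PySem.List.mem_pyRange_one, inR, and_assoc]

theorem nodup_cells (N : Int) : (cells N).Nodup :=
  (PySem.List.nodup_pyRange_one 0 N).product (PySem.List.nodup_pyRange_one 0 N)

theorem length_cells (N : Int) : (cells N).length = N.toNat * N.toNat := by
  simp [cells, List.length_product, PySem.List.length_pyRange_one]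

def visCount (va : List (List Int)) (N : Int) : Nat :=
  (cells N).countP (fun p => !(cellGet va p (-1) == -1))

theorem visCount_le (va : List (List Int)) (N : Int) :
    visCount va N ≤ N.toNat * N.toNat := by
  rw [← length_cells N]; exact List.countP_le_length

theorem countP_update {α : Type} {l : List α} {p q : α → Bool} {x : α}
    (hl : l.Nodup) (hx : x ∈ l) (hpx : p x = false) (hqx : q x = true)
    (hagree : ∀ y ∈ l, y ≠ x → q y = p y) :
    l.countP q = l.countP p + 1 := by
  induction l with
  | nil => simp at hx
  | cons a t ih =>
    rcases List.mem_cons.mp hx with h | h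
    · subst h
      have : ∀ y ∈ t, q y = p y := fun y hy =>
        hagree y (List.mem_cons_of_mem _ hy) (fun he => (List.nodup_cons.mp hl).1 (he ▸ hy))
      rw [List.countP_cons, List.countP_cons, hpx, hqx, List.countP_congr (fun y hy => by rw [this y hy])]
      simp
    · have hax : a ≠ x := fun he => (List.nodup_cons.mp hl).1 (he ▸ h)
      rw [List.countP_cons, List.countP_cons,
        hagree a (List.mem_cons_self) hax,
        ih (List.nodup_cons.mp hl).2 h (fun y hy hne => hagree y (List.mem_cons_of_mem _ hy) hne)]
      omega

theorem visCount_set {va : List (List Int)} {n : Nat} {N : Int}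
    (hs : Shape va n) (hn : n = N.toNat) {c : Int × Int} (hc : inR N c)
    (hold : cellGet va c (-1) = -1) {a : Int} (ha : a ≠ -1) :
    visCount (cellSet va c a) N = visCount va N + 1 := by
  unfold visCount
  exact countP_update (nodup_cells N) (mem_cells.mpr hc)
    (by simp [hold]) (by simp [cellGet_cellSet_self hs hn hc, ha])
    (fun y hy hne => by simp [cellGet_cellSet_ne hs hn hc (mem_cells.mp hy) hne])

-- ---------- the bisimulation invariant ----------
-- A's queue is the unprocessed rest F of B's current frontier followed by the
-- next frontier G built so far; A's distance grid and B's boolean grid agree.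
def BInv (g : List (List Int)) (N : Int) (empties t : Int)
    (F G : List (Int × Int)) (va : List (List Int)) (vb : List (List Bool))
    (rem : Int) : Prop :=
  Shape va N.toNat ∧ Shape vb N.toNat ∧ 0 ≤ t ∧
  (∀ c, inR N c → ((cellGet vb c false = true) ↔ cellGet va c (-1) ≠ -1)) ∧
  (∀ c ∈ F, inR N c ∧ cellGet va c (-1) = t) ∧
  (∀ c ∈ G, inR N c ∧ cellGet va c (-1) = t + 1) ∧
  (∀ c, inR N c → -1 ≤ cellGet va c (-1) ∧ cellGet va c (-1) ≤ t + 1) ∧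
  rem = empties - (visCount va N : Int)

theorem BInv_weaken {g : List (List Int)} {N empties t : Int} {c : Int × Int}
    {F G : List (Int × Int)} {va : List (List Int)} {vb : List (List Bool)} {rem : Int}
    (hI : BInv g N empties t (c :: F) G va vb rem) : BInv g N empties t F G va vb rem := by
  obtain ⟨h1, h2, h3, h4, h5, h6, h7, h8⟩ := hI
  exact ⟨h1, h2, h3, h4, fun c0 h => h5 c0 (List.mem_cons_of_mem _ h), h6, h7, h8⟩

theorem stepSim {g : List (List Int)} {N empties t : Int} {c : Int × Int}
    {F G P : List (Int × Int)} {va : List (List Int)} {vb : List (List Bool)} {rem : Int}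
    (hI : BInv g N empties t (c :: F) G va vb rem) (d : Int × Int) {n : Int × Int}
    (hn : (c.1 + d.1, c.2 + d.2) = n) :
    ∃ G' va' vb' rem',
      astep g N c (P ++ G, va) d = (P ++ G', va') ∧
      bstep g N (G, vb, rem) n = (G', vb', rem') ∧
      BInv g N empties t (c :: F) G' va' vb' rem' ∧
      G.length ≤ G'.length ∧
      visCount va' N + G.length = visCount va N + G'.length ∧
      (G'.length = G.length → (G' = G ∧ va' = va ∧ vb' = vb ∧ rem' = rem)) := by
  obtain ⟨hsa, hsb, ht, hrel, hF, hG, hbd, hrem⟩ := hI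
  obtain ⟨hcR, hct⟩ := hF c List.mem_cons_self
  subst hn
  set n : Int × Int := (c.1 + d.1, c.2 + d.2) with hndef
  by_cases hin : 0 ≤ n.1 ∧ n.1 < N ∧ 0 ≤ n.2 ∧ n.2 < N ∧ ¬ gget g n.1 n.2 = 1
  · obtain ⟨i1, i2, i3, i4, i5⟩ := hin
    have hnR : inR N n := ⟨i1, i2, i3, i4⟩
    by_cases hv : cellGet va n (-1) = -1
    · -- fresh cell: both sides append and mark
      have hvb : cellGet vb n false = false := by
        by_contra hbc
        have hbt : cellGet vb n false = true := by
          revert hbc; cases cellGet vb n false <;> simp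
        exact (hrel n hnR).mp hbt hv
      have hnc : ∀ c0 ∈ c :: F, c0 ≠ n := by
        intro c0 h0 he
        obtain ⟨_, hc0⟩ := hF c0 h0
        rw [he, hv] at hc0; omega
      have hnG : ∀ c0 ∈ G, c0 ≠ n := by
        intro c0 h0 he
        obtain ⟨_, hc0⟩ := hG c0 h0
        rw [he, hv] at hc0; omega
      refine ⟨G ++ [n], cellSet va n (t + 1), cellSet vb n true, rem - 1, ?_, ?_, ?_, ?_, ?_, ?_⟩
      · show astep g N c (P ++ G, va) d = _
        simp only [astep]
        rw [if_pos ⟨i1, i2, i3, i4, i5⟩]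
        rw [if_pos (Or.inl hv)]
        simp only [hct, List.append_assoc]
        rfl
      · simp only [bstep]
        rw [if_pos ⟨i1, i2, i3, i4, i5, hvb⟩]
      · refine ⟨shape_cellSet hsa rfl hnR _, shape_cellSet hsb rfl hnR _, ht, ?_, ?_, ?_, ?_, ?_⟩
        · intro c0 h0
          by_cases he : c0 = n
          · subst he
            rw [cellGet_cellSet_self hsa rfl hnR, cellGet_cellSet_self hsb rfl hnR]
            constructor
            · intro _; omega
            · intro _; rfl
          · rw [cellGet_cellSet_ne hsa rfl hnR h0 he,
              cellGet_cellSet_ne hsb rfl hnR h0 he]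
            exact hrel c0 h0
        · intro c0 h0
          obtain ⟨hR0, hv0⟩ := hF c0 h0
          rw [cellGet_cellSet_ne hsa rfl hnR hR0 (hnc c0 h0)]
          exact ⟨hR0, hv0⟩
        · intro c0 h0
          rcases List.mem_append.mp h0 with h0 | h0
          · obtain ⟨hR0, hv0⟩ := hG c0 h0
            rw [cellGet_cellSet_ne hsa rfl hnR hR0 (hnG c0 h0)]
            exact ⟨hR0, hv0⟩
          · rw [List.mem_singleton.mp h0]
            rw [cellGet_cellSet_self hsa rfl hnR]
            exact ⟨hnR, rfl⟩
        · intro c0 h0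
          by_cases he : c0 = n
          · subst he
            rw [cellGet_cellSet_self hsa rfl hnR]; omega
          · rw [cellGet_cellSet_ne hsa rfl hnR h0 he]
            exact hbd c0 h0
        · rw [visCount_set hsa rfl hnR hv (by omega)]
          push_cast
          omega
      · simp
      · rw [visCount_set hsa rfl hnR hv (by omega)]
        simp
        omega
      · intro h; simp at h
    · -- already visited: both sides skip
      have hvb : cellGet vb n false = true := (hrel n hnR).mpr hv
      refine ⟨G, va, vb, rem, ?_, ?_, ?_, le_refl _, rfl, fun _ => ⟨rfl, rfl, rfl, rfl⟩⟩
      · simp only [astep]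
        rw [if_pos ⟨i1, i2, i3, i4, i5⟩]
        rw [if_neg]
        rintro (h | h)
        · exact hv h
        · rw [← hndef, hct] at h
          exact absurd (hbd n hnR).2 (by omega)
      · simp only [bstep]
        rw [if_neg]
        intro h
        rw [hvb] at h
        exact absurd h.2.2.2.2.2 (by simp)
      · exact ⟨hsa, hsb, ht, hrel, hF, hG, hbd, hrem⟩
  · -- out of board or wall: both sides skip
    refine ⟨G, va, vb, rem, ?_, ?_, ?_, le_refl _, rfl, fun _ => ⟨rfl, rfl, rfl, rfl⟩⟩
    · simp only [astep]
      rw [if_neg hin]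
    · simp only [bstep]
      rw [if_neg]
      intro h
      exact hin ⟨h.1, h.2.1, h.2.2.1, h.2.2.2.1, h.2.2.2.2.1⟩
    · exact ⟨hsa, hsb, ht, hrel, hF, hG, hbd, hrem⟩

theorem cellSim {g : List (List Int)} {N empties t : Int} {c : Int × Int}
    {F G P : List (Int × Int)} {va : List (List Int)} {vb : List (List Bool)} {rem : Int}
    (hI : BInv g N empties t (c :: F) G va vb rem) :
    ∃ G' va' vb' rem',
      dirs.foldl (astep g N c) (P ++ G, va) = (P ++ G', va') ∧
      bcell g N (G, vb, rem) c = (G', vb', rem') ∧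
      BInv g N empties t F G' va' vb' rem' ∧
      G.length ≤ G'.length ∧
      visCount va' N + G.length = visCount va N + G'.length ∧
      (G'.length = G.length → (G' = G ∧ va' = va)) := by
  obtain ⟨G1, va1, vb1, rem1, ha1, hb1, hI1, hl1, hv1, he1⟩ :=
    stepSim (P := P) hI ((-1 : Int), (0 : Int)) (show (c.1 + -1, c.2 + 0) = (c.1 - 1, c.2) by simp [Prod.ext_iff]; omega)
  obtain ⟨G2, va2, vb2, rem2, ha2, hb2, hI2, hl2, hv2, he2⟩ :=
    stepSim (P := P) hI1 ((0 : Int), (1 : Int)) (show (c.1 + 0, c.2 + 1) = (c.1, c.2 + 1) by simp)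
  obtain ⟨G3, va3, vb3, rem3, ha3, hb3, hI3, hl3, hv3, he3⟩ :=
    stepSim (P := P) hI2 ((1 : Int), (0 : Int)) (show (c.1 + 1, c.2 + 0) = (c.1 + 1, c.2) by simp)
  obtain ⟨G4, va4, vb4, rem4, ha4, hb4, hI4, hl4, hv4, he4⟩ :=
    stepSim (P := P) hI3 ((0 : Int), (-1 : Int)) (show (c.1 + 0, c.2 + -1) = (c.1, c.2 - 1) by simp [Prod.ext_iff]; omega)
  refine ⟨G4, va4, vb4, rem4, ?_, ?_, BInv_weaken hI4, by omega, by omega, ?_⟩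
  · simp only [dirs, List.foldl_cons, List.foldl_nil]
    rw [ha1, ha2, ha3, ha4]
  · simp only [bcell, neighbors, List.foldl_cons, List.foldl_nil]
    rw [hb1, hb2, hb3, hb4]
  · intro hlen
    obtain ⟨g4, a4, b4, r4⟩ := he4 (by omega)
    obtain ⟨g3, a3, b3, r3⟩ := he3 (by omega)
    obtain ⟨g2, a2, b2, r2⟩ := he2 (by omega)
    obtain ⟨g1, a1, b1, r1⟩ := he1 (by omega)
    exact ⟨by rw [g4, g3, g2, g1], by rw [a4, a3, a2, a1]⟩

theorem drainSim {g : List (List Int)} {N empties t : Int} :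
    ∀ (F : List (Int × Int)) {G : List (Int × Int)} {va : List (List Int)}
      {vb : List (List Bool)} {rem : Int} (k : Nat),
    BInv g N empties t F G va vb rem →
    ∃ G' va' vb' rem',
      F.foldl (bcell g N) (G, vb, rem) = (G', vb', rem') ∧
      aloop g N (F.length + k) (F ++ G) va = aloop g N k G' va' ∧
      BInv g N empties t [] G' va' vb' rem' ∧
      G.length ≤ G'.length ∧
      visCount va' N + G.length = visCount va N + G'.length ∧
      (G'.length = G.length → (G' = G ∧ va' = va)) := by
  intro F
  induction F with
  | nil =>
    intro G va vb rem k hI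
    obtain ⟨h1, h2, h3, h4, _, h6, h7, h8⟩ := hI
    exact ⟨G, va, vb, rem, rfl, by simp, ⟨h1, h2, h3, h4, by simp, h6, h7, h8⟩,
      le_refl _, rfl, fun _ => ⟨rfl, rfl⟩⟩
  | cons c F' ih =>
    intro G va vb rem k hI
    obtain ⟨G1, va1, vb1, rem1, ha1, hb1, hI1, hl1, hv1, he1⟩ := cellSim (P := F') hI
    obtain ⟨G', va', vb', rem', hfold, haloop, hI', hl', hv', he'⟩ := ih (G := G1) k hI1
    refine ⟨G', va', vb', rem', ?_, ?_, hI', by omega, by omega, ?_⟩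
    · rw [List.foldl_cons, hb1, hfold]
    · have hlen : (c :: F').length + k = (F'.length + k) + 1 := by simp only [List.length_cons]; omega
      rw [hlen]
      show aloop g N ((F'.length + k) + 1) (c :: (F' ++ G)) va = _
      rw [aloop]
      simp only [ha1]
      exact haloop
    · intro hlen
      obtain ⟨ge', ae'⟩ := he' (by omega)
      obtain ⟨ge1, ae1⟩ := he1 (by omega)
      exact ⟨by rw [ge', ge1], by rw [ae', ae1]⟩

-- ---------- the running maximum of A's distance grid ----------
def maxfold (va : List (List Int)) (N : Int) : Int :=
  (cells N).foldl (fun m c => max m (cellGet va c (-1))) 0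

theorem foldl_product_general {α β γ : Type} (l₁ : List α) (l₂ : List β)
    (h : γ → α × β → γ) (init : γ) :
    l₁.foldl (fun m i => l₂.foldl (fun m j => h m (i, j)) m) init
      = (l₁ ×ˢ l₂).foldl h init := by
  induction l₁ generalizing init with
  | nil => rfl
  | cons a l ih => simp [List.product_cons, List.foldl_append, List.foldl_map, ih]

theorem maxfold_eq_of {va : List (List Int)} {N K : Int}
    (hub : ∀ c, inR N c → cellGet va c (-1) ≤ K) (hK : 0 ≤ K)
    (hw : K = 0 ∨ ∃ c, inR N c ∧ cellGet va c (-1) = K) :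
    maxfold va N = K := by
  unfold maxfold
  rw [show (fun (m : Int) (c : Int × Int) => max m (cellGet va c (-1)))
      = (fun (m : Int) (c : Int × Int) => max m ((fun c => cellGet va c (-1)) c)) from rfl,
    ← List.foldl_map]
  apply le_antisymm
  · rcases PySem.List.foldl_max_mem ((cells N).map fun c => cellGet va c (-1)) 0 with h | h
    · rw [h]; exact hK
    · obtain ⟨c, hc, he⟩ := List.mem_map.mp h
      rw [← he]
      exact hub c (mem_cells.mp hc)
  · rcases hw with h | ⟨c, hcR, hcv⟩
    · rw [h]
      exact (PySem.List.le_foldl_max ((cells N).map fun c => cellGet va c (-1)) 0).1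
    · rw [← hcv]
      exact (PySem.List.le_foldl_max ((cells N).map fun c => cellGet va c (-1)) 0).2 _
        (List.mem_map_of_mem (mem_cells.mpr hcR))

-- ---------- the synchronised round-by-round loop ----------
theorem roundSim {g : List (List Int)} {N empties : Int} :
    ∀ (fb : Nat) (F : List (Int × Int)) (va : List (List Int)) (vb : List (List Bool))
      (rem last t : Int) (fa : Nat),
    BInv g N empties t F [] va vb rem →
    (∀ c, inR N c → cellGet va c (-1) ≤ t) →
    maxfold va N = (if F = [] then last else t) →
    (F ≠ [] → last = t) →
    0 ≤ last →
    (N.toNat * N.toNat - visCount va N) + 2 ≤ fb →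
    F.length + (N.toNat * N.toNat - visCount va N) + 1 ≤ fa →
    maxfold (aloop g N fa F va) N = (bloop g N fb F vb t last rem).1 ∧
    (bloop g N fb F vb t last rem).2 = empties - (visCount (aloop g N fa F va) N : Int) ∧
    0 ≤ (bloop g N fb F vb t last rem).1 ∧
    Shape (aloop g N fa F va) N.toNat := by
  intro fb
  induction fb with
  | zero => intro F va vb rem last t fa hI hub hmax hlast h0 hfb hfa; omega
  | succ fb ih =>
    intro F va vb rem last t fa hI hub hmax hlast h0 hfb hfa
    by_cases hF : F = []
    · subst hF
      have haloop : aloop g N fa [] va = va := by cases fa <;> rfl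
      rw [show bloop g N (fb + 1) [] vb t last rem = (last, rem) by rw [bloop]; rfl, haloop]
      rw [if_pos rfl] at hmax
      exact ⟨hmax, hI.2.2.2.2.2.2.2, h0, hI.1⟩
    · obtain ⟨G', va1, vb1, rem1, hfold, haloop, hI', hl', hv', he'⟩ :=
        drainSim F (k := fa - F.length) hI
      have hfa' : F.length + (fa - F.length) = fa := by omega
      rw [List.append_nil] at haloop
      rw [hfa'] at haloop
      have hbstep : bloop g N (fb + 1) F vb t last rem
          = bloop g N fb G' vb1 (t + 1) (if G'.isEmpty then last else t + 1) rem1 := by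
        rw [bloop]
        rw [if_neg (by simpa using hF)]
        simp only [hfold]
      rw [hbstep, haloop]
      by_cases hG : G' = []
      · -- no new infection: next round terminates immediately
        subst hG
        obtain ⟨-, hva1⟩ := he' rfl
        obtain ⟨fb', rfl⟩ : ∃ fb', fb = fb' + 1 := ⟨fb - 1, by omega⟩
        rw [show bloop g N (fb' + 1) [] vb1 (t + 1) (if ([] : List (Int × Int)).isEmpty then last else t + 1) rem1
            = (last, rem1) by rw [bloop]; rfl]
        have haz : aloop g N (fa - F.length) [] va1 = va1 := by
          cases (fa - F.length) <;> rfl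
        rw [haz, hva1]
        rw [if_neg hF] at hmax
        refine ⟨?_, ?_, h0, hI.1⟩
        · rw [hmax, hlast hF]
        · have h8 := hI'.2.2.2.2.2.2.2
          rw [hva1] at h8
          exact h8
      · -- new frontier: recurse one round deeper
        have ht0 : 0 ≤ t := hI.2.2.1
        have hInext : BInv g N empties (t + 1) G' [] va1 vb1 rem1 := by
          obtain ⟨j1, j2, j3, j4, _, j6, j7, j8⟩ := hI'
          refine ⟨j1, j2, by omega, j4, j6, by simp, ?_, j8⟩
          intro c0 h0'
          have := j7 c0 h0'
          omega
        have hub1 : ∀ c, inR N c → cellGet va1 c (-1) ≤ t + 1 :=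
          fun c0 h0' => (hI'.2.2.2.2.2.2.1 c0 h0').2
        have hmax1 : maxfold va1 N = (if G' = [] then (t + 1) else (t + 1)) := by
          rw [if_neg hG]
          apply maxfold_eq_of hub1 (by omega)
          right
          obtain ⟨c0, hc0⟩ : ∃ c0, c0 ∈ G' := by
            cases G' with
            | nil => exact absurd rfl hG
            | cons a t => exact ⟨a, List.mem_cons_self⟩
          exact ⟨c0, (hI'.2.2.2.2.2.1 c0 hc0).1, (hI'.2.2.2.2.2.1 c0 hc0).2⟩
        have hvis1 : visCount va1 N = visCount va N + G'.length := by simpa using hv'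
        have hle1 := visCount_le va1 N
        have hle0 := visCount_le va N
        have hGlen : 1 ≤ G'.length := by
          cases G' with
          | nil => exact absurd rfl hG
          | cons a t => simp
        rw [show (if G'.isEmpty then last else t + 1) = t + 1 by
          rw [if_neg (by simpa using hG)]]
        exact ih G' va1 vb1 rem1 (t + 1) (t + 1) (fa - F.length) hInext hub1 hmax1
          (fun _ => rfl) (by omega) (by omega) (by omega)

-- ---------- initial marking of the chosen sources ----------
theorem initFold {N : Int} :
    ∀ (comb : List (Int × Int)) (va : List (List Int)) (vb : List (List Bool)),
    comb.Nodup → (∀ c ∈ comb, inR N c) →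
    Shape va N.toNat → Shape vb N.toNat →
    (∀ c, inR N c → ((cellGet vb c false = true) ↔ cellGet va c (-1) ≠ -1)) →
    (∀ c ∈ comb, cellGet va c (-1) = -1) →
    (∀ c, inR N c → cellGet va c (-1) = -1 ∨ cellGet va c (-1) = 0) →
    Shape (comb.foldl (fun v c => cellSet v c 0) va) N.toNat ∧
    Shape (comb.foldl (fun v c => cellSet v c true) vb) N.toNat ∧
    (∀ c, inR N c → ((cellGet (comb.foldl (fun v c => cellSet v c true) vb) c false = true)
        ↔ cellGet (comb.foldl (fun v c => cellSet v c 0) va) c (-1) ≠ -1)) ∧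
    (∀ c ∈ comb, cellGet (comb.foldl (fun v c => cellSet v c 0) va) c (-1) = 0) ∧
    (∀ c, inR N c → cellGet (comb.foldl (fun v c => cellSet v c 0) va) c (-1) = -1
        ∨ cellGet (comb.foldl (fun v c => cellSet v c 0) va) c (-1) = 0) ∧
    (∀ c, inR N c → cellGet va c (-1) ≠ -1 →
        cellGet (comb.foldl (fun v c => cellSet v c 0) va) c (-1) = cellGet va c (-1)) ∧
    visCount (comb.foldl (fun v c => cellSet v c 0) va) N = visCount va N + comb.length := by
  intro comb
  induction comb with
  | nil =>
    intro va vb _ _ hsa hsb hrel _ hval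
    exact ⟨hsa, hsb, hrel, by simp, hval, fun _ _ _ => rfl, by simp⟩
  | cons c comb' ih =>
    intro va vb hnd hin hsa hsb hrel hfresh hval
    have hcR : inR N c := hin c List.mem_cons_self
    have hcv : cellGet va c (-1) = -1 := hfresh c List.mem_cons_self
    have hnd' := (List.nodup_cons.mp hnd).2
    have hcnot : c ∉ comb' := (List.nodup_cons.mp hnd).1
    set va1 := cellSet va c 0 with hva1
    set vb1 := cellSet vb c true with hvb1
    have hsa1 : Shape va1 N.toNat := shape_cellSet hsa rfl hcR _
    have hsb1 : Shape vb1 N.toNat := shape_cellSet hsb rfl hcR _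
    have hget1 : ∀ c0, inR N c0 → c0 ≠ c → cellGet va1 c0 (-1) = cellGet va c0 (-1) :=
      fun c0 h0 hne => cellGet_cellSet_ne hsa rfl hcR h0 hne _ _
    have hgetc : cellGet va1 c (-1) = 0 := cellGet_cellSet_self hsa rfl hcR _ _
    have hrel1 : ∀ c0, inR N c0 →
        ((cellGet vb1 c0 false = true) ↔ cellGet va1 c0 (-1) ≠ -1) := by
      intro c0 h0
      by_cases he : c0 = c
      · subst he
        rw [hgetc, cellGet_cellSet_self hsb rfl hcR]
        simp
      · rw [hget1 c0 h0 he, cellGet_cellSet_ne hsb rfl hcR h0 he]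
        exact hrel c0 h0
    have hfresh1 : ∀ c0 ∈ comb', cellGet va1 c0 (-1) = -1 := by
      intro c0 h0
      rw [hget1 c0 (hin c0 (List.mem_cons_of_mem _ h0))
        (fun he => hcnot (he ▸ h0))]
      exact hfresh c0 (List.mem_cons_of_mem _ h0)
    have hval1 : ∀ c0, inR N c0 → cellGet va1 c0 (-1) = -1 ∨ cellGet va1 c0 (-1) = 0 := by
      intro c0 h0
      by_cases he : c0 = c
      · subst he; right; exact hgetc
      · rw [hget1 c0 h0 he]; exact hval c0 h0
    obtain ⟨j1, j2, j3, j4, j5, j6, j7⟩ := ih va1 vb1 hnd'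
      (fun c0 h0 => hin c0 (List.mem_cons_of_mem _ h0)) hsa1 hsb1 hrel1 hfresh1 hval1
    have hfold : (c :: comb').foldl (fun v c => cellSet v c 0) va
        = comb'.foldl (fun v c => cellSet v c 0) va1 := by rw [List.foldl_cons]
    have hfoldb : (c :: comb').foldl (fun v c => cellSet v c true) vb
        = comb'.foldl (fun v c => cellSet v c true) vb1 := by rw [List.foldl_cons]
    rw [hfold, hfoldb]
    refine ⟨j1, j2, j3, ?_, j5, ?_, ?_⟩
    · intro c0 h0
      rcases List.mem_cons.mp h0 with he | h0'
      · subst he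
        rw [j6 c0 hcR (by rw [hgetc]; omega), hgetc]
      · exact j4 c0 h0'
    · intro c0 h0 hvv
      have hne : c0 ≠ c := fun he => by rw [he, hcv] at hvv; exact hvv rfl
      rw [j6 c0 h0 (by rw [hget1 c0 h0 hne]; exact hvv), hget1 c0 h0 hne]
    · rw [j7, visCount_set hsa rfl hcR hcv (by omega)]
      simp only [List.length_cons]
      omega

-- ---------- converting the ports' row scans to counts over board cells ----------
theorem countP_not_split {α : Type} (l : List α) (p : α → Bool) :
    l.countP p + l.countP (fun a => !(p a)) = l.length := by
  induction l with
  | nil => simp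
  | cons a t ih =>
    simp only [List.countP_cons, List.length_cons]
    cases h : p a <;> simp [h] <;> omega

theorem countP_product {α β : Type} (l₁ : List α) (l₂ : List β) (q : α × β → Bool) :
    (l₁ ×ˢ l₂).countP q = (l₁.map (fun i => l₂.countP (fun j => q (i, j)))).sum := by
  induction l₁ with
  | nil => rfl
  | cons a l ih =>
    simp only [List.product_cons, List.countP_append, List.countP_map, ih]
    rfl

theorem countGrid_eq {N : Int} (hN : 0 ≤ N) {v : List (List Int)}
    (hrows : ∀ i : Nat, i < N.toNat → (v.getD i []).length = N.toNat) (x : Int) :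
    ((PySem.List.pyRange 0 N).foldl
        (fun s i => s + PySem.List.count (PySem.List.pyGetD v i []) x) (0 : Nat))
      = (cells N).countP (fun p => cellGet v p (-1) == x) := by
  rw [PySem.List.foldl_add_nat (PySem.List.pyRange 0 N)
    (fun i => PySem.List.count (PySem.List.pyGetD v i []) x) 0]
  rw [List.map_congr_left (l := PySem.List.pyRange 0 N)
    (f := fun i => PySem.List.count (PySem.List.pyGetD v i []) x)
    (g := fun i => (PySem.List.pyRange 0 N).countP
        (fun j => cellGet v (i, j) (-1) == x)) ?_]
  · rw [show cells N = (PySem.List.pyRange 0 N) ×ˢ (PySem.List.pyRange 0 N) from rfl,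
      countP_product (PySem.List.pyRange 0 N) (PySem.List.pyRange 0 N)
      (fun p => cellGet v p (-1) == x)]
    simp
  · intro i hi
    obtain ⟨hi0, hiN⟩ := PySem.List.mem_pyRange_one.mp hi
    have hrowlen : ((PySem.List.pyGetD v i []).length : Int) = N := by
      rw [PySem.List.pyGetD_of_nonneg _ _ hi0, hrows i.toNat (by omega)]
      omega
    beta_reduce
    rw [PySem.List.count_eq, List.count_eq_countP]
    conv_lhs => rw [show PySem.List.pyGetD v i []
      = ((PySem.List.pyRange 0 ((PySem.List.pyGetD v i []).length : Int)).map
          (fun j => PySem.List.pyGetD (PySem.List.pyGetD v i []) j (-1))) from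
        (PySem.List.map_pyGetD_pyRange_zero' _ _).symm]
    rw [hrowlen, List.countP_map]
    rfl

-- ---------- the list of possible virus locations ----------
theorem filter_product {α β : Type} (l₁ : List α) (l₂ : List β) (p : α × β → Bool) :
    (l₁ ×ˢ l₂).filter p
      = l₁.flatMap (fun a => (l₂.filter (fun b => p (a, b))).map (fun b => (a, b))) := by
  induction l₁ with
  | nil => rfl
  | cons a l ih =>
    simp only [List.product_cons, List.filter_append, ih, List.filter_map, List.flatMap_cons]
    rfl

theorem loc2_eq {g : List (List Int)} {N : Int} :
    (PySem.List.pyRange 0 N).foldl (fun acc i =>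
      (PySem.List.pyRange 0 N).foldl (fun acc j =>
        if gget g i j = 2 then acc ++ [(i, j)] else acc) acc) []
    = (cells N).filter (fun p => decide (gget g p.1 p.2 = 2)) := by
  rw [PySem.List.foldl_congr_mem (PySem.List.pyRange 0 N) _
    (fun acc i => acc ++ ((PySem.List.pyRange 0 N).filter
      (fun j => decide (gget g i j = 2))).map (fun j => ((i : Int), j))) []
    (fun acc i _ => PySem.List.foldl_append_ite (fun j => gget g i j = 2) (fun j => (i, j))
      (PySem.List.pyRange 0 N) acc)]
  rw [PySem.List.foldl_append_eq_flatMap]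
  rw [show cells N = (PySem.List.pyRange 0 N) ×ˢ (PySem.List.pyRange 0 N) from rfl,
    filter_product]
  rfl

-- ---------- one source subset: A's whole pass equals B's whole pass ----------
theorem percombSim {g : List (List Int)} {N number1 empties : Int} (hN : 0 ≤ N)
    (hne : number1 + empties = (N.toNat * N.toNat : Int))
    {comb : List (Int × Int)} (hnd : comb.Nodup) (hcomb : ∀ c ∈ comb, inR N c) :
    ∃ (cov : Bool) (mx : Int), 0 ≤ mx ∧
      (∀ ans, acomb g N number1 ans comb
        = if cov then some (match ans with | none => mx | some a => min a mx) else ans) ∧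
      (∀ best, bcomb g N empties best comb
        = if cov = true ∧ (best = -1 ∨ mx < best) then mx else best) := by
  have hn : N.toNat = N.toNat := rfl
  set va0 : List (List Int) := List.replicate N.toNat (List.replicate N.toNat (-1)) with hva0
  set vb0 : List (List Bool) := List.replicate N.toNat (List.replicate N.toNat false) with hvb0
  have hsa0 : Shape va0 N.toNat := shape_replicate _ _
  have hsb0 : Shape vb0 N.toNat := shape_replicate _ _
  have hrel0 : ∀ c, inR N c → ((cellGet vb0 c false = true) ↔ cellGet va0 c (-1) ≠ -1) := by
    intro c hc
    rw [cellGet_replicate rfl hc, cellGet_replicate rfl hc]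
    simp
  have hfresh0 : ∀ c ∈ comb, cellGet va0 c (-1) = -1 :=
    fun c hc => cellGet_replicate rfl (hcomb c hc) _ _
  have hval0 : ∀ c, inR N c → cellGet va0 c (-1) = -1 ∨ cellGet va0 c (-1) = 0 :=
    fun c hc => Or.inl (cellGet_replicate rfl hc _ _)
  have hvis0 : visCount va0 N = 0 := by
    unfold visCount
    apply List.countP_eq_zero.mpr
    intro p hp
    rw [hva0]
    simp [cellGet_replicate rfl (mem_cells.mp hp)]
  obtain ⟨k1, k2, k3, k4, k5, -, k7⟩ :=
    initFold comb va0 vb0 hnd hcomb hsa0 hsb0 hrel0 hfresh0 hval0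
  set va1 := comb.foldl (fun v c => cellSet v c 0) va0 with hva1
  set vb1 := comb.foldl (fun v c => cellSet v c true) vb0 with hvb1
  have hvis1 : visCount va1 N = comb.length := by rw [k7, hvis0]; omega
  have hI : BInv g N empties 0 comb [] va1 vb1 (empties - comb.length) := by
    refine ⟨k1, k2, le_refl 0, k3, ?_, by simp, ?_, ?_⟩
    · intro c hc; exact ⟨hcomb c hc, k4 c hc⟩
    · intro c hc
      rcases k5 c hc with h | h <;> rw [h] <;> constructor <;> omega
    · rw [hvis1]
  have hub : ∀ c, inR N c → cellGet va1 c (-1) ≤ 0 := by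
    intro c hc; rcases k5 c hc with h | h <;> omega
  have hmax0 : maxfold va1 N = (if comb = ([] : List (Int × Int)) then 0 else 0) := by
    rw [ite_self]
    exact maxfold_eq_of hub (le_refl 0) (Or.inl rfl)
  obtain ⟨hmx, hrem, h0mx, hshape⟩ :=
    roundSim (N.toNat * N.toNat + 2) comb va1 vb1 (empties - comb.length) 0 0
      (N.toNat * N.toNat + comb.length + 1) hI hub hmax0 (fun _ => rfl) (le_refl 0)
      (by omega) (by omega)
  set v2 := aloop g N (N.toNat * N.toNat + comb.length + 1) comb va1 with hv2
  set res := bloop g N (N.toNat * N.toNat + 2) comb vb1 0 0 (empties - comb.length) with hres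
  have hcount := countGrid_eq hN (fun i hi => shape_row hshape hi) (-1)
  have hsplit := countP_not_split (cells N) (fun p => cellGet v2 p (-1) == -1)
  have hlen := length_cells N
  have hvisle := visCount_le v2 N
  have hviseq : (((cells N).countP (fun p => cellGet v2 p (-1) == -1) : Nat) : Int)
      = (N.toNat * N.toNat : Int) - (visCount v2 N : Int) := by
    have hv : (cells N).countP (fun p => !(cellGet v2 p (-1) == -1)) = visCount v2 N := rfl
    rw [hv] at hsplit
    omega
  have hmaxport : (PySem.List.pyRange 0 N).foldl
      (fun m i => (PySem.List.pyRange 0 N).foldl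
        (fun m j => max m (cellGet v2 (i, j) (-1))) m) 0 = res.1 := by
    rw [foldl_product_general (PySem.List.pyRange 0 N) (PySem.List.pyRange 0 N)
      (fun m c => max m (cellGet v2 c (-1))) 0]
    exact hmx
  refine ⟨decide (res.2 = 0), res.1, h0mx, ?_, ?_⟩
  · intro ans
    show acomb g N number1 ans comb = _
    rw [acomb]
    simp only [← hva0, ← hva1, ← hv2, hmaxport]
    have hfoldval : (((PySem.List.pyRange 0 N).foldl
        (fun s i => s + PySem.List.count (PySem.List.pyGetD v2 i []) (-1)) 0 : Nat) : Int)
        = (N.toNat * N.toNat : Int) - (visCount v2 N : Int) := by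
      rw [hcount]
      exact hviseq
    by_cases hc : res.2 = 0
    · have heq : (N.toNat * N.toNat : Int) - (visCount v2 N : Int) = number1 := by
        rw [hrem] at hc; omega
      rw [if_neg (not_not_intro (by rw [hfoldval, heq])), if_pos (by simp [hc])]
    · have hneq : ¬ ((N.toNat * N.toNat : Int) - (visCount v2 N : Int) = number1) := by
        intro he
        apply hc
        rw [hrem]
        omega
      rw [if_pos (by rw [hfoldval]; exact hneq), if_neg (by simp [hc])]
  · intro best
    show bcomb g N empties best comb = _
    rw [bcomb]
    simp only [← hvb0, ← hvb1, ← hres]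
    by_cases hc : res.2 = 0 <;> simp [hc]

-- ---------- folding over all source subsets ----------
def ansRel (ans : Option Int) (best : Int) : Prop :=
  (ans = none ∧ best = -1) ∨ (∃ a, ans = some a ∧ best = a ∧ 0 ≤ a)

theorem outerSim {g : List (List Int)} {N number1 empties : Int} (hN : 0 ≤ N)
    (hne : number1 + empties = (N.toNat * N.toNat : Int)) :
    ∀ (combs : List (List (Int × Int))) (ans : Option Int) (best : Int),
    ansRel ans best →
    (∀ comb ∈ combs, comb.Nodup ∧ ∀ c ∈ comb, inR N c) →
    ansRel (combs.foldl (acomb g N number1) ans) (combs.foldl (bcomb g N empties) best) := by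
  intro combs
  induction combs with
  | nil => intro ans best h _; exact h
  | cons comb rest ih =>
    intro ans best h hall
    obtain ⟨hnd, hcomb⟩ := hall comb List.mem_cons_self
    obtain ⟨cov, mx, hmx0, hA, hB⟩ := percombSim hN hne hnd hcomb
    rw [List.foldl_cons, List.foldl_cons, hA ans, hB best]
    apply ih _ _ ?_ (fun c hc => hall c (List.mem_cons_of_mem _ hc))
    cases cov with
    | false => simpa using h
    | true =>
      rcases h with ⟨ha, hb⟩ | ⟨a, ha, hb, h0⟩
      · rw [ha, hb, if_pos rfl, if_pos ⟨rfl, Or.inl rfl⟩]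
        exact Or.inr ⟨mx, rfl, rfl, hmx0⟩
      · rw [ha, hb, if_pos rfl]
        by_cases hlt : mx < a
        · rw [if_pos ⟨rfl, Or.inr hlt⟩]
          refine Or.inr ⟨min a mx, rfl, ?_, le_min h0 hmx0⟩
          rw [min_eq_right (le_of_lt hlt)]
        · rw [if_neg ?_]
          · refine Or.inr ⟨min a mx, rfl, ?_, le_min h0 hmx0⟩
            exact (min_eq_left (not_lt.mp hlt)).symm
          · rintro ⟨-, hcase | hcase⟩
            · omega
            · exact hlt hcase

-- ---------- row widths of the input grid, and default-independence ----------
theorem cellGet_irrel {α : Type} {v : List (List α)} {N : Int}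
    (hrows : ∀ i : Nat, i < N.toNat → (v.getD i []).length = N.toNat)
    {c : Int × Int} (hc : inR N c) (d d' : α) : cellGet v c d = cellGet v c d' := by
  obtain ⟨h1, h2, h3, h4⟩ := hc
  rw [cellGet_nonneg _ _ _ h1 h3, cellGet_nonneg _ _ _ h1 h3]
  have hlt : c.2.toNat < (v.getD c.1.toNat []).length := by
    rw [hrows c.1.toNat (by omega)]; omega
  rw [List.getD_eq_getElem _ d hlt, List.getD_eq_getElem _ d' hlt]

-- ===== VERDICT (by name: the statement is the Claim_ definition above) =====
theorem solution_spec : Claim_equal_solution := by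
  intro graph N M hdom hpre
  unfold Spec_solution
  obtain ⟨hM, hrest⟩ := hpre
  by_cases hNpos : N ≤ 0
  · -- degenerate board: no cells at all
    have hr : PySem.List.pyRange 0 N = [] := PySem.List.pyRange_one_eq_nil (by omega)
    have hn0 : N.toNat = 0 := by omega
    rw [solution, solution_alt]
    simp only [hr, List.foldl_nil]
    cases hM0 : M.toNat with
    | zero =>
      rw [PySem.List.combinations_zero]
      simp only [List.foldl_cons, List.foldl_nil]
      rw [acomb, bcomb]
      simp only [hn0, hr, List.foldl_nil, List.length_nil, List.replicate_zero]
      norm_num [aloop, bloop]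
    | succ m =>
      rw [PySem.List.combinations_nil_succ]
      simp
  · have h0N : 0 ≤ N := by omega
    rcases hrest with hle | ⟨hlen, hrows⟩
    · omega
    have hrows' : ∀ i : Nat, i < N.toNat → (graph.getD i []).length = N.toNat := by
      intro i hi
      have hig : i < graph.length := by omega
      have hmem : graph.getD i [] ∈ graph.take N.toNat := by
        rw [List.getD_eq_getElem _ _ hig]
        rw [show graph[i] = (graph.take N.toNat)[i]'(by rw [List.length_take]; omega) from
          (List.getElem_take).symm]
        exact List.getElem_mem _
      have := hrows _ hmem
      omega
    have hwall := countGrid_eq h0N hrows' 1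
    have hempt : ((PySem.List.pyRange 0 N).foldl (fun s i =>
        (PySem.List.pyRange 0 N).foldl (fun s j =>
          if gget graph i j ≠ 1 then s + 1 else s) s) (0 : Int))
        = (((cells N).countP (fun p => decide (gget graph p.1 p.2 ≠ 1)) : Nat) : Int) := by
      rw [foldl_product_general (PySem.List.pyRange 0 N) (PySem.List.pyRange 0 N)
        (fun s (c : Int × Int) => if gget graph c.1 c.2 ≠ 1 then s + 1 else s) 0]
      rw [show (PySem.List.pyRange 0 N) ×ˢ (PySem.List.pyRange 0 N) = cells N from rfl]
      rw [PySem.List.foldl_ite_add_one (fun c : Int × Int => gget graph c.1 c.2 ≠ 1) (cells N) 0]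
      simp
    have hsum : (cells N).countP (fun p => cellGet graph p (-1) == 1)
        + (cells N).countP (fun p => decide (gget graph p.1 p.2 ≠ 1))
        = N.toNat * N.toNat := by
      rw [show (cells N).countP (fun p => decide (gget graph p.1 p.2 ≠ 1))
          = (cells N).countP (fun p => !(cellGet graph p (-1) == 1)) from
        List.countP_congr (fun c hc => by
          have hirr := cellGet_irrel hrows' (mem_cells.mp hc) (-1 : Int) 0
          show decide (gget graph c.1 c.2 ≠ 1) = true ↔ (!(cellGet graph c (-1) == 1)) = true
          rw [show gget graph c.1 c.2 = cellGet graph c 0 from rfl, ← hirr]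
          simp)]
      rw [countP_not_split, length_cells]
    rw [solution, solution_alt]
    simp only [loc2_eq, hwall, hempt]
    have hne : (((cells N).countP (fun p => cellGet graph p (-1) == 1) : Nat) : Int)
        + (((cells N).countP (fun p => decide (gget graph p.1 p.2 ≠ 1)) : Nat) : Int)
        = (N.toNat * N.toNat : Int) := by
      omega
    have hall : ∀ comb ∈ PySem.List.combinations
        ((cells N).filter (fun p => decide (gget graph p.1 p.2 = 2))) M.toNat,
        comb.Nodup ∧ ∀ c ∈ comb, inR N c := by
      intro comb hc
      have hsub := ((PySem.List.mem_combinations_iff _ _ _).mp hc).1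
      refine ⟨hsub.nodup ((nodup_cells N).filter _), ?_⟩
      intro c hcc
      have := List.mem_filter.mp (hsub.subset hcc)
      exact mem_cells.mp this.1
    have houter := outerSim (g := graph) h0N hne (PySem.List.combinations
      ((cells N).filter (fun p => decide (gget graph p.1 p.2 = 2))) M.toNat)
      none (-1) (Or.inl ⟨rfl, rfl⟩) hall
    rcases houter with ⟨hA, hB⟩ | ⟨a, hA, hB, h0⟩
    · rw [hA, hB]
    · rw [hA, hB]
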